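-- pv_equiv track=rewrite | github.com/guardian/jai_2022_sandbox | prodigy/el_recipe.py | missing_quote_counts
-- ===== SOURCE A (Python) =====
-- def missing_quote_counts(test_string):
--     """Count number of instances where a paragraph ends before a quote is closed i.e. multi-paragraph quotes."""
--     mq_count = 0
--     quote_count = 0
--     open_flag = False
--     for i, char in enumerate(test_string):
--         if char == "\"" and open_flag is False:
--             quote_count += 1
--             open_flag = True
--
--         elif char == "\"" and open_flag is True:
--             quote_count += 1
--             open_flag = False
--         elif test_string[i:i + 4] == "</p>" and open_flag is True:
--             open_flag = False
--             mq_count += 1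
--
--     return mq_count
-- ===== SOURCE B (Python) =====
-- def missing_quote_counts(test_string):
--     """Count number of instances where a paragraph ends before a quote is closed i.e. multi-paragraph quotes."""
--     mq_count = 0
--     open_flag = False
--     for segment in test_string.split('"'):
--         if open_flag and '</p>' in segment:
--             mq_count += 1
--             open_flag = False
--         open_flag = not open_flag
--     return mq_count
-- ===== Notes on version B (the rewrite author's own statement) =====
-- stated objective: faster
-- what changed: B replaces A's per-character state machine (which takes a 4-character slice at every index and keeps an unused quote counter) by splitting the string on the quote character once and doing a single paragraph-end containment test per segment, toggling the open flag at each segment boundary.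
import Mathlib
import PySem

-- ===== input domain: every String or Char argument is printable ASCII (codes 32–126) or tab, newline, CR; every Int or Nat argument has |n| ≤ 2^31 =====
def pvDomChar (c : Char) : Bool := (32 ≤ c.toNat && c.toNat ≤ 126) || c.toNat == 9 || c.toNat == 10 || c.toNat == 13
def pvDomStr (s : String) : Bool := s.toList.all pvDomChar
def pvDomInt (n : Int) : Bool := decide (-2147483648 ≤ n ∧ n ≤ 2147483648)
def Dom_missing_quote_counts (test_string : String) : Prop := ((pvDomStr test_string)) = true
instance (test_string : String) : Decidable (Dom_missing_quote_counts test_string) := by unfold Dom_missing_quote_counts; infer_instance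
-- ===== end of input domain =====

-- B replaces A's per-character state machine (with a 4-char slice test at every index) by splitting the
-- string once on the quote character and doing one containment test per segment; same result, measured faster.

-- ===== PORT A =====
def missing_quote_counts (test_string : String) : Int :=
  let cs := test_string.toList
  (List.foldl
    (fun (st : Int × Int × Bool) (ic : Int × Char) =>
      if ic.2 == '"' && st.2.2 == false then (st.1, st.2.1 + 1, true)
      else if ic.2 == '"' && st.2.2 == true then (st.1, st.2.1 + 1, false)
      else if PySem.List.slice cs (some ic.1) (some (ic.1 + 4)) == ['<','/','p','>'] && st.2.2 == true then
        (st.1 + 1, st.2.1, false)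
      else st)
    (0, 0, false) (PySem.List.enumerate cs)).1

-- ===== PORT B =====
def missing_quote_counts_alt (test_string : String) : Int :=
  (List.foldl
    (fun (st : Int × Bool) (segment : List Char) =>
      let st' := if st.2 && PySem.Chars.isIn ['<','/','p','>'] segment then (st.1 + 1, false) else st
      (st'.1, !st'.2))
    (0, false) (PySem.Chars.splitOn test_string.toList ['"'])).1

-- ===== PRECONDITION & SPEC =====
def Spec_missing_quote_counts (test_string : String) (out : Int) : Prop := out = missing_quote_counts_alt test_string
instance (test_string : String) (out : Int) : Decidable (Spec_missing_quote_counts test_string out) := by unfold Spec_missing_quote_counts; infer_instance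

-- ===== CLAIM (what is proved, stated in full; the proofs are below) =====
def Claim_equal_missing_quote_counts : Prop := ∀ (test_string : String), Dom_missing_quote_counts test_string → Spec_missing_quote_counts test_string (missing_quote_counts test_string)

-- ===== LEMMAS AND PROOFS =====

-- reference count: the common meaning of both loops on the character list
def pvCnt : Bool → List Char → Int
  | _, [] => 0
  | fl, c :: rest =>
    if c == '"' then pvCnt (!fl) rest
    else if fl && (List.take 4 (c :: rest) == ['<','/','p','>']) then 1 + pvCnt false rest
    else pvCnt fl rest

-- functional description of PySem.Chars.splitOn for the single-char separator '"'
def pvSplit : List Char → List Char → List (List Char)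
  | pre, [] => [pre]
  | pre, c :: rest => if c == '"' then pre :: pvSplit [] rest else pvSplit (pre ++ [c]) rest

lemma pvGo (fuel : Nat) : ∀ (l cur : List Char) (acc : List (List Char)), l.length ≤ fuel →
    PySem.Chars.splitOn.go ['"'] fuel l cur acc = acc.reverse ++ pvSplit cur.reverse l := by
  induction fuel with
  | zero =>
    intro l cur acc h
    have hl : l = [] := by cases l <;> simp_all
    subst hl
    simp [PySem.Chars.splitOn.go, pvSplit]
  | succ fuel ih =>
    intro l cur acc h
    cases l with
    | nil => simp [PySem.Chars.splitOn.go, pvSplit]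
    | cons c rest =>
      by_cases hc : c = '"'
      · subst hc
        rw [show PySem.Chars.splitOn.go ['"'] (fuel+1) ('"'::rest) cur acc
              = PySem.Chars.splitOn.go ['"'] fuel rest [] (cur.reverse :: acc) by
            simp [PySem.Chars.splitOn.go, List.isPrefixOf]]
        rw [ih rest [] (cur.reverse :: acc) (by simpa using Nat.le_of_succ_le_succ h)]
        simp [pvSplit]
      · rw [show PySem.Chars.splitOn.go ['"'] (fuel+1) (c::rest) cur acc
              = PySem.Chars.splitOn.go ['"'] fuel rest (c :: cur) acc by
            simp [PySem.Chars.splitOn.go, List.isPrefixOf]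
            exact fun h => absurd h.symm hc]
        rw [ih rest (c :: cur) acc (by simpa using Nat.le_of_succ_le_succ h)]
        simp [pvSplit, hc]

lemma pvSplitOn_eq (s : List Char) : PySem.Chars.splitOn s ['"'] = pvSplit [] s := by
  have := pvGo (s.length + 1) s [] [] (Nat.le_succ _)
  simpa [PySem.Chars.splitOn] using this

-- an occurrence of '</p>' cannot straddle the boundary before a '"' (or the end of string)
lemma pvPrefixBoundary (seg tail : List Char)
    (ht : tail = [] ∨ ∃ t', tail = '"' :: t') :
    (['<','/','p','>'] <+: seg ++ tail) ↔ (['<','/','p','>'] <+: seg) := by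
  constructor
  · intro h
    have heq := List.prefix_iff_eq_take.mp h
    by_cases hlen : 4 ≤ seg.length
    · rw [List.prefix_iff_eq_take]
      rw [List.take_append] at heq
      simpa [Nat.sub_eq_zero_of_le hlen] using heq
    · exfalso
      rcases ht with rfl | ⟨t', rfl⟩
      · have := congrArg List.length heq
        simp at this
        omega
      · have hmem : ('"' : Char) ∈ (['<','/','p','>'] : List Char) := by
          rw [heq, List.take_append]
          have h1 : 1 ≤ 4 - seg.length := by omega
          have : ('"' : Char) ∈ List.take (4 - seg.length) ('"' :: t') := by
            cases hk : 4 - seg.length with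
            | zero => omega
            | succ k => simp
          simp [this]
        simp at hmem
  · intro h
    exact h.trans (List.prefix_append seg tail)

-- processing one quote-free segment
lemma pvSegCnt (tail : List Char) (ht : tail = [] ∨ ∃ t', tail = '"' :: t') :
    ∀ (seg : List Char) (fl : Bool), ('"' ∉ seg) →
    pvCnt fl (seg ++ tail) =
      (if fl && PySem.Chars.isIn ['<','/','p','>'] seg then 1 else 0)
      + pvCnt (fl && !(PySem.Chars.isIn ['<','/','p','>'] seg)) tail := by
  intro seg
  induction seg with
  | nil =>
    intro fl _
    have : PySem.Chars.isIn ['<','/','p','>'] ([] : List Char) = false := by decide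
    simp [this]
  | cons c seg' ih =>
    intro fl hnm
    have hc : ¬ (c = '"') := fun h => hnm (by simp [h])
    have hnm' : ('"' : Char) ∉ seg' := fun h => hnm (List.mem_cons_of_mem _ h)
    have htake : (List.take 4 (c :: (seg' ++ tail)) == ['<','/','p','>'])
        = decide ((['<','/','p','>'] : List Char) <+: (c :: seg')) := by
      by_cases hp : (['<','/','p','>'] : List Char) <+: (c :: seg')
      · have hpre : (['<','/','p','>'] : List Char) <+: ((c :: seg') ++ tail) :=
          (pvPrefixBoundary (c :: seg') tail ht).mpr hp
        have h4 : List.take 4 (c :: (seg' ++ tail)) = ['<','/','p','>'] := by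
          simpa using (List.prefix_iff_eq_take.mp hpre).symm
        rw [h4]
        simp [hp]
      · have hnp : ¬ ((['<','/','p','>'] : List Char) <+: ((c :: seg') ++ tail)) :=
          fun h => hp ((pvPrefixBoundary (c :: seg') tail ht).mp h)
        have h4 : ¬ (List.take 4 (c :: (seg' ++ tail)) = ['<','/','p','>']) := by
          intro h
          exact hnp (List.prefix_iff_eq_take.mpr (by simpa using h.symm))
        simp [beq_iff_eq, hp]
        intro hceq h3
        exact h4 (by simp [hceq, h3])
    have hstep : ∀ g : Bool, pvCnt g ((c :: seg') ++ tail)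
        = if g && (List.take 4 (c :: (seg' ++ tail)) == ['<','/','p','>']) then
            1 + pvCnt false (seg' ++ tail) else pvCnt g (seg' ++ tail) := by
      intro g
      rw [List.cons_append]
      simp only [pvCnt]
      rw [if_neg (by simp [hc])]
    rw [hstep fl, htake]
    cases fl with
    | false =>
      have h0 : pvCnt false (seg' ++ tail) = pvCnt false tail := by simpa using ih false hnm'
      simpa using h0
    | true =>
      by_cases hp : (['<','/','p','>'] : List Char) <+: (c :: seg')
      · have hin : PySem.Chars.isIn ['<','/','p','>'] (c :: seg') = true :=
          (PySem.Chars.isIn_iff_infix _ _).mpr hp.isInfix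
        have h0 : pvCnt false (seg' ++ tail) = pvCnt false tail := by simpa using ih false hnm'
        simp [hin, hp, h0]
      · have hin : PySem.Chars.isIn ['<','/','p','>'] (c :: seg')
            = PySem.Chars.isIn ['<','/','p','>'] seg' := by
          by_cases h3 : (['<','/','p','>'] : List Char) <:+: seg'
          · rw [(PySem.Chars.isIn_iff_infix _ _).mpr h3,
               (PySem.Chars.isIn_iff_infix _ _).mpr (List.infix_cons_iff.mpr (Or.inr h3))]
          · rw [(PySem.Chars.isIn_eq_false_iff _ _).mpr h3,
               (PySem.Chars.isIn_eq_false_iff _ _).mpr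
                 (fun h => by rcases List.infix_cons_iff.mp h with h' | h' <;> [exact hp h'; exact h3 h'])]
        have h0 := ih true hnm'
        rw [hin]
        simp only [decide_eq_false hp, Bool.and_false, Bool.false_eq_true, if_false, Bool.true_and]
        simpa using h0

-- B's fold over the segments computes pvCnt
lemma pvB_loop : ∀ (l pre : List Char) (fl : Bool) (mq : Int), ('"' : Char) ∉ pre →
    (List.foldl
      (fun (st : Int × Bool) (segment : List Char) =>
        let st' := if st.2 && PySem.Chars.isIn ['<','/','p','>'] segment then (st.1 + 1, false) else st
        (st'.1, !st'.2))
      (mq, fl) (pvSplit pre l)).1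
      = mq + pvCnt fl (pre ++ l) := by
  intro l
  induction l with
  | nil =>
    intro pre fl mq hpre
    have hseg := pvSegCnt [] (Or.inl rfl) pre fl hpre
    simp only [List.append_nil] at hseg
    simp only [pvSplit, List.foldl_cons, List.foldl_nil, List.append_nil]
    rw [hseg]
    by_cases h : (fl && PySem.Chars.isIn ['<','/','p','>'] pre) = true
    · simp only [if_pos h, pvCnt]
      omega
    · simp only [if_neg h, pvCnt]
      omega
  | cons c l' ih =>
    intro pre fl mq hpre
    by_cases hc : c = '"'
    · subst hc
      rw [show pvSplit pre ('"' :: l') = pre :: pvSplit [] l' by simp [pvSplit]]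
      have hseg := pvSegCnt ('"' :: l') (Or.inr ⟨l', rfl⟩) pre fl hpre
      simp only [List.foldl_cons]
      by_cases h : (fl && PySem.Chars.isIn ['<','/','p','>'] pre) = true
      · simp only [if_pos h]
        rw [show ((((mq : Int) + 1, false).1, !((mq : Int) + 1, (false : Bool)).2) : Int × Bool)
              = (mq + 1, true) from rfl]
        rw [ih [] true (mq + 1) (by simp)]
        rw [hseg]
        have hflag : (fl && !(PySem.Chars.isIn ['<','/','p','>'] pre)) = false := by
          revert h; cases fl <;> cases PySem.Chars.isIn ['<','/','p','>'] pre <;> simp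
        simp only [if_pos h, hflag, pvCnt, List.nil_append]
        rw [if_pos (by decide)]
        simp only [Bool.not_false]
        omega
      · simp only [if_neg h]
        rw [show ((((mq : Int), fl).1, !((mq : Int), fl).2) : Int × Bool) = (mq, !fl) from rfl]
        rw [ih [] (!fl) mq (by simp)]
        rw [hseg]
        have hflag : (fl && !(PySem.Chars.isIn ['<','/','p','>'] pre)) = fl := by
          revert h; cases fl <;> cases PySem.Chars.isIn ['<','/','p','>'] pre <;> simp
        simp only [if_neg h, hflag, pvCnt, List.nil_append]
        rw [if_pos (by decide)]
        omega
    · rw [show pvSplit pre (c :: l') = pvSplit (pre ++ [c]) l' by simp [pvSplit, hc]]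
      rw [ih (pre ++ [c]) fl mq (by
        intro hm
        rcases List.mem_append.mp hm with hm | hm
        · exact hpre hm
        · simp at hm; exact hc hm.symm)]
      simp

-- A's indexed fold computes pvCnt
lemma pvA_loop (full : List Char) : ∀ (rest : List Char) (k : Nat) (st : Int × Int × Bool),
    full.drop k = rest →
    (List.foldl
      (fun (st : Int × Int × Bool) (ic : Int × Char) =>
        if ic.2 == '"' && st.2.2 == false then (st.1, st.2.1 + 1, true)
        else if ic.2 == '"' && st.2.2 == true then (st.1, st.2.1 + 1, false)
        else if PySem.List.slice full (some ic.1) (some (ic.1 + 4)) == ['<','/','p','>'] && st.2.2 == true then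
          (st.1 + 1, st.2.1, false)
        else st)
      st (PySem.List.enumerate rest (k : Int))).1 = st.1 + pvCnt st.2.2 rest := by
  intro rest
  induction rest with
  | nil => intro k st h; simp [PySem.List.enumerate, pvCnt]
  | cons c rest' ih =>
    intro k st h
    have hdrop : full.drop (k + 1) = rest' := by
      rw [← List.drop_drop, h]; rfl
    have hslice : PySem.List.slice full (some (k : Int)) (some ((k : Int) + 4))
        = List.take 4 (c :: rest') := by
      have := PySem.List.slice_natCast full k (k + 4)
      rw [show ((k : Int) + 4) = ((k + 4 : Nat) : Int) by push_cast; ring]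
      rw [this, h]
      congr 1
      omega
    rw [show PySem.List.enumerate (c :: rest') (k : Int)
          = ((k : Int), c) :: PySem.List.enumerate rest' ((k : Int) + 1) from rfl]
    rw [show ((k : Int) + 1) = ((k + 1 : Nat) : Int) by push_cast; ring]
    obtain ⟨mq, qc, fl⟩ := st
    simp only [List.foldl_cons]
    by_cases hc : c = '"'
    · cases fl with
      | false =>
        rw [show ((if (c == '"' && (false : Bool) == false) then ((mq : Int), (qc : Int) + 1, true)
              else if (c == '"' && (false : Bool) == true) then (mq, qc + 1, false)
              else if (PySem.List.slice full (some (k : Int)) (some ((k : Int) + 4)) == ['<','/','p','>'] && (false : Bool) == true) then (mq + 1, qc, false)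
              else (mq, qc, false)) : Int × Int × Bool) = (mq, qc + 1, true) by simp [hc]]
        rw [ih (k + 1) (mq, qc + 1, true) hdrop]
        simp [pvCnt, hc]
      | true =>
        rw [show ((if (c == '"' && (true : Bool) == false) then ((mq : Int), (qc : Int) + 1, true)
              else if (c == '"' && (true : Bool) == true) then (mq, qc + 1, false)
              else if (PySem.List.slice full (some (k : Int)) (some ((k : Int) + 4)) == ['<','/','p','>'] && (true : Bool) == true) then (mq + 1, qc, false)
              else (mq, qc, true)) : Int × Int × Bool) = (mq, qc + 1, false) by simp [hc]]
        rw [ih (k + 1) (mq, qc + 1, false) hdrop]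
        simp [pvCnt, hc]
    · cases fl with
      | false =>
        rw [show ((if (c == '"' && (false : Bool) == false) then ((mq : Int), (qc : Int) + 1, true)
              else if (c == '"' && (false : Bool) == true) then (mq, qc + 1, false)
              else if (PySem.List.slice full (some (k : Int)) (some ((k : Int) + 4)) == ['<','/','p','>'] && (false : Bool) == true) then (mq + 1, qc, false)
              else (mq, qc, false)) : Int × Int × Bool) = (mq, qc, false) by simp [hc]]
        rw [ih (k + 1) (mq, qc, false) hdrop]
        simp [pvCnt, hc]
      | true =>
        have hcnt : pvCnt true (c :: rest')
            = if (List.take 4 (c :: rest') == ['<','/','p','>']) then 1 + pvCnt false rest'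
              else pvCnt true rest' := by
          simp only [pvCnt]
          rw [if_neg (by simp [hc])]
          simp only [Bool.true_and]
        by_cases hp : (List.take 4 (c :: rest') == (['<','/','p','>'] : List Char)) = true
        · rw [show ((if (c == '"' && (true : Bool) == false) then ((mq : Int), (qc : Int) + 1, true)
              else if (c == '"' && (true : Bool) == true) then (mq, qc + 1, false)
              else if (PySem.List.slice full (some (k : Int)) (some ((k : Int) + 4)) == ['<','/','p','>'] && (true : Bool) == true) then (mq + 1, qc, false)
              else (mq, qc, true)) : Int × Int × Bool) = (mq + 1, qc, false) by
            rw [if_neg (by simp), if_neg (by simp [hc]), hslice, hp]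
            simp]
          rw [ih (k + 1) (mq + 1, qc, false) hdrop]
          show mq + 1 + pvCnt false rest' = mq + pvCnt true (c :: rest')
          rw [hcnt, if_pos hp]
          omega
        · have hp' : (List.take 4 (c :: rest') == (['<','/','p','>'] : List Char)) = false :=
            Bool.eq_false_iff.mpr hp
          rw [show ((if (c == '"' && (true : Bool) == false) then ((mq : Int), (qc : Int) + 1, true)
              else if (c == '"' && (true : Bool) == true) then (mq, qc + 1, false)
              else if (PySem.List.slice full (some (k : Int)) (some ((k : Int) + 4)) == ['<','/','p','>'] && (true : Bool) == true) then (mq + 1, qc, false)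
              else (mq, qc, true)) : Int × Int × Bool) = (mq, qc, true) by
            rw [if_neg (by simp), if_neg (by simp [hc]), hslice, hp']
            simp]
          rw [ih (k + 1) (mq, qc, true) hdrop]
          show mq + pvCnt true rest' = mq + pvCnt true (c :: rest')
          rw [hcnt, if_neg hp]

-- ===== VERDICT (by name: the statement is the Claim_ definition above) =====
theorem missing_quote_counts_spec : Claim_equal_missing_quote_counts := by
  intro s _
  unfold Spec_missing_quote_counts missing_quote_counts missing_quote_counts_alt
  rw [pvSplitOn_eq]
  have hA := pvA_loop s.toList s.toList 0 (0, 0, false) rfl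
  have hB := pvB_loop s.toList [] false 0 (by simp)
  simp only [Nat.cast_zero] at hA
  simp only [List.nil_append] at hB
  simp only []
  rw [hA, hB]
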